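-- pv_equiv track=rewrite | github.com/shague/Broadcom | sms/csv.py | fmt_ids
-- ===== SOURCE A (Python) =====
-- from typing import List
--
-- def fmt_ids(ids: List[int]) -> str:
--     out = ""
--     for cnt, value in enumerate(ids):
--         if cnt % 10:
--             out += f" {value}"
--         elif cnt:
--             out += f"\n{value}"
--         else:
--             out += f"{value}"
--     return out
-- ===== SOURCE B (Python) =====
-- def fmt_ids(ids):
--     lines = []
--     i = 0
--     n = len(ids)
--     while i < n:
--         lines.append(' '.join(str(v) for v in ids[i:i+10]))
--         i += 10
--     return '\n'.join(lines)
-- ===== Notes on version B (the rewrite author's own statement) =====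
-- stated objective: idiomatic
-- what changed: Replaces the flat enumerate pass that branches on cnt % 10 and concatenates piecewise with an index loop that slices ids into 10-element chunks, joining each chunk with ' ' and the chunk lines with '\n'.
import Mathlib
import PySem

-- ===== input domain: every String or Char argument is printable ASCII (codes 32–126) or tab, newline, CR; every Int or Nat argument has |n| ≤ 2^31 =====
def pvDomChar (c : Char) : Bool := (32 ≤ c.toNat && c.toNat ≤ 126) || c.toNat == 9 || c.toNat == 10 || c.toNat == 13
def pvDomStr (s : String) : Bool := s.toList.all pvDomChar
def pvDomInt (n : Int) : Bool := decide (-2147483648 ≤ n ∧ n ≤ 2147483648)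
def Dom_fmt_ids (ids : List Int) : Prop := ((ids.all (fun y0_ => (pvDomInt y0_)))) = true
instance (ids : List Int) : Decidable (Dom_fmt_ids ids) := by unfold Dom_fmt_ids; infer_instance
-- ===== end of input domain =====

-- B replaces A's flat enumerate pass (branching on cnt % 10 with repeated concatenation)
-- by slicing the list into 10-element chunks and joining with ' ' and '\n' (objective: idiomatic).

-- ===== PORT A =====
-- literal port of A: fold over enumerate(ids), branching on cnt % 10 and cnt
def fmt_ids (ids : List Int) : String :=
  (PySem.List.enumerate ids).foldl
    (fun out p =>
      if PySem.Int.mod p.1 10 ≠ 0 then out ++ (" " ++ PySem.Int.toStr p.2)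
      else if p.1 ≠ 0 then out ++ ("\n" ++ PySem.Int.toStr p.2)
      else out ++ PySem.Int.toStr p.2)
    ""

-- ===== PORT B =====
-- port of Source B's while loop: index i steps by 10, each step appends the line for ids[i:i+10]
def fmtLinesIdx (ids : List Int) (i : Nat) : List String :=
  if i < ids.length then
    PySem.Str.join " " ((PySem.List.slice ids (some (i : Int)) (some ((i : Int) + 10))).map PySem.Int.toStr)
      :: fmtLinesIdx ids (i + 10)
  else []
termination_by ids.length - i

def fmt_ids_alt (ids : List Int) : String :=
  PySem.Str.join "\n" (fmtLinesIdx ids 0)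

-- ===== PRECONDITION & SPEC =====
def Spec_fmt_ids (ids : List Int) (out : String) : Prop := out = fmt_ids_alt ids
instance (ids : List Int) (out : String) : Decidable (Spec_fmt_ids ids out) := by unfold Spec_fmt_ids; infer_instance

-- ===== CLAIM (what is proved, stated in full; the proofs are below) =====
def Claim_equal_fmt_ids : Prop := ∀ (ids : List Int), Dom_fmt_ids ids → Spec_fmt_ids ids (fmt_ids ids)

-- ===== LEMMAS AND PROOFS =====

-- the character contribution of one enumerated element in A's loop
def hE (p : Int × Int) : List Char :=
  if PySem.Int.mod p.1 10 ≠ 0 then ' ' :: PySem.Int.toChars p.2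
  else if p.1 ≠ 0 then '\n' :: PySem.Int.toChars p.2
  else PySem.Int.toChars p.2

-- proof-side view of B's loop: peel chunks off the front of the remaining list
def chunksOf (rest : List Int) : List String :=
  if h : rest = [] then []
  else
    PySem.Str.join " " ((rest.take 10).map PySem.Int.toStr) :: chunksOf (rest.drop 10)
termination_by rest.length
decreasing_by
  have : 1 ≤ rest.length := List.length_pos_of_ne_nil h
  simp only [List.length_drop]
  omega

-- unfolding one step of B's chunking on a nonempty list
theorem chunksOf_cons (ids : List Int) (h : ids ≠ []) :
    chunksOf ids
      = PySem.Str.join " " ((ids.take 10).map PySem.Int.toStr) :: chunksOf (ids.drop 10) := by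
  rw [chunksOf, dif_neg h]

-- B's index loop computes the chunks of the not-yet-processed suffix
theorem fmtLinesIdx_eq_chunksOf (ids : List Int) : ∀ (i : Nat),
    fmtLinesIdx ids i = chunksOf (ids.drop i) := by
  have H : ∀ (k i : Nat), ids.length - i ≤ k → fmtLinesIdx ids i = chunksOf (ids.drop i) := by
    intro k
    induction k with
    | zero =>
      intro i hi
      rw [fmtLinesIdx, if_neg (by omega), chunksOf, dif_pos (List.drop_eq_nil_iff.mpr (by omega))]
    | succ k ih =>
      intro i hi
      by_cases hlt : i < ids.length
      · have hne : ids.drop i ≠ [] := by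
          simp only [ne_eq, List.drop_eq_nil_iff]; omega
        rw [fmtLinesIdx, if_pos hlt, chunksOf_cons (ids.drop i) hne,
          show ((i : Int) + 10) = ((i : Int) + ((10 : ℕ) : Int)) from by norm_num,
          PySem.List.slice_natCast_add ids i 10,
          ih (i + 10) (by omega), List.drop_drop]
      · rw [fmtLinesIdx, if_neg hlt, chunksOf, dif_pos (List.drop_eq_nil_iff.mpr (by omega))]
  intro i; exact H (ids.length - i) i le_rfl

-- A's fold, characterised: it appends hE of every enumerated element
theorem foldA_toList (l : List (Int × Int)) (out : String) :
    ((l.foldl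
      (fun out p =>
        if PySem.Int.mod p.1 10 ≠ 0 then out ++ (" " ++ PySem.Int.toStr p.2)
        else if p.1 ≠ 0 then out ++ ("\n" ++ PySem.Int.toStr p.2)
        else out ++ PySem.Int.toStr p.2)
      out).toList) = out.toList ++ (l.map hE).flatten := by
  induction l generalizing out with
  | nil => simp
  | cons p t ih =>
    simp only [List.foldl_cons, List.map_cons, List.flatten_cons]
    rw [ih]
    unfold hE
    split_ifs <;>
      simp [String.toList_append, PySem.Int.toList_toStr]

theorem chunksOf_eq_nil_iff (l : List Int) : chunksOf l = [] ↔ l = [] := by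
  constructor
  · intro h
    by_contra hne
    rw [chunksOf] at h
    simp [hne] at h
  · intro h; subst h; rw [chunksOf]; simp

theorem chunksOf_nil : chunksOf [] = [] := by rw [chunksOf]; simp

-- a chunk line, seen as characters
theorem lineToList (l : List Int) :
    (PySem.Str.join " " (l.map PySem.Int.toStr)).toList
      = PySem.Chars.join [' '] (l.map PySem.Int.toChars) := by
  rw [PySem.Str.toList_join, show (" " : String).toList = [' '] from rfl]
  congr 1
  simp [List.map_map, Function.comp_def, PySem.Int.toList_toStr]

-- the space-join of a nonempty chunk, element by element
theorem lineJoin (t : List Int) : ∀ (v : Int),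
    PySem.Chars.join [' '] (List.map PySem.Int.toChars (v :: t))
      = PySem.Int.toChars v ++ (List.map (fun w => ' ' :: PySem.Int.toChars w) t).flatten := by
  induction t with
  | nil => intro v; simp [PySem.Chars.join_singleton]
  | cons w r ih =>
    intro v
    rw [List.map_cons, List.map_cons, PySem.Chars.join_cons_cons, ← List.map_cons, ih w]
    simp

-- elements strictly inside a chunk: every one contributes ' ' ++ digits
theorem inner_chunk (l : List Int) : ∀ (c : ℕ), c % 10 ≠ 0 → c % 10 + l.length ≤ 10 →
    ((PySem.List.enumerate l (c : Int)).map hE).flatten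
      = (l.map (fun v => ' ' :: PySem.Int.toChars v)).flatten := by
  induction l with
  | nil => simp
  | cons v t ih =>
    intro c hc hlen
    rw [PySem.List.enumerate_cons]
    simp only [List.map_cons, List.flatten_cons]
    have h1 : hE ((c : Int), v) = ' ' :: PySem.Int.toChars v := by
      unfold hE
      rw [PySem.Int.mod_eq_emod_of_pos (by norm_num)]
      have hne : ((c : Int)) % 10 ≠ 0 := by omega
      rw [if_pos hne]
    rw [h1]
    rcases eq_or_ne t [] with ht | ht
    · subst ht; simp
    · have htl : 1 ≤ t.length := List.length_pos_of_ne_nil ht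
      simp only [List.length_cons] at hlen
      have h2 : ((c : Int)) + 1 = (((c + 1 : ℕ)) : Int) := by push_cast; ring
      rw [h2, ih (c + 1) (by omega) (by omega)]

-- one whole chunk (length ≤ 10) starting at counter 10*q
theorem chunk_eq (l : List Int) (q : ℕ) (hl : l ≠ []) (hlen : l.length ≤ 10) :
    ((PySem.List.enumerate l ((10 * q : ℕ) : Int)).map hE).flatten
      = (if q = 0 then [] else ['\n'])
        ++ PySem.Chars.join [' '] (l.map PySem.Int.toChars) := by
  cases l with
  | nil => exact absurd rfl hl
  | cons v t =>
    rw [PySem.List.enumerate_cons]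
    simp only [List.map_cons, List.flatten_cons]
    have hhead : hE (((10 * q : ℕ) : Int), v)
        = (if q = 0 then [] else ['\n']) ++ PySem.Int.toChars v := by
      unfold hE
      rw [PySem.Int.mod_eq_emod_of_pos (by norm_num)]
      have hmod : ((10 * q : ℕ) : Int) % 10 = 0 := by omega
      rw [hmod]
      rcases Nat.eq_zero_or_pos q with hq | hq
      · subst hq; simp
      · have hne : ((10 * q : ℕ) : Int) ≠ 0 := by positivity
        simp [Nat.pos_iff_ne_zero.mp hq]
    rw [hhead, ← List.map_cons, lineJoin t v]
    rcases eq_or_ne t [] with ht | ht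
    · subst ht; simp
    · have h2 : ((10 * q : ℕ) : Int) + 1 = (((10 * q + 1 : ℕ)) : Int) := by push_cast; ring
      simp only [List.length_cons] at hlen
      rw [h2, inner_chunk t (10 * q + 1) (by omega) (by omega)]
      simp

-- main invariant: A's enumerated tail starting at counter 10*q against B's chunking
theorem main_inv (n : ℕ) : ∀ (ids : List Int), ids.length ≤ n → ∀ (q : ℕ),
    ((PySem.List.enumerate ids ((10 * q : ℕ) : Int)).map hE).flatten
      = if ids = [] then []
        else (if q = 0 then [] else ['\n'])
          ++ PySem.Chars.join ['\n'] ((chunksOf ids).map String.toList) := by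
  induction n with
  | zero =>
    intro ids hlen q
    have : ids = [] := List.length_eq_zero_iff.mp (Nat.le_zero.mp hlen)
    subst this; simp
  | succ n ih =>
    intro ids hlen q
    by_cases hids : ids = []
    · subst hids; simp
    · rw [if_neg hids, chunksOf_cons ids hids]
      by_cases hd : ids.drop 10 = []
      · -- single chunk
        have hlen10 : ids.length ≤ 10 := List.drop_eq_nil_iff.mp hd
        have htake : ids.take 10 = ids := List.take_of_length_le hlen10
        rw [chunk_eq ids q hids hlen10, hd, chunksOf_nil, htake]
        simp only [List.map_cons, List.map_nil, PySem.Chars.join_singleton]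
        rw [lineToList]
      · -- head chunk then the rest, whose counters start at 10*(q+1)
        have hlong : 10 < ids.length := by
          rcases Nat.lt_or_ge 10 ids.length with h | h
          · exact h
          · exact absurd (List.drop_eq_nil_iff.mpr h) hd
        have htlen : (ids.take 10).length = 10 := by simp; omega
        have htne : ids.take 10 ≠ [] := by
          intro h; rw [h] at htlen; simp at htlen
        conv_lhs => rw [(List.take_append_drop 10 ids).symm]
        rw [PySem.List.enumerate_append, List.map_append, List.flatten_append]
        have hcast : ((10 * q : ℕ) : Int) + ((ids.take 10).length : Int)
            = ((10 * (q + 1) : ℕ) : Int) := by rw [htlen]; push_cast; ring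
        rw [chunk_eq (ids.take 10) q htne (by omega), hcast,
          ih (ids.drop 10) (by simp; omega) (q + 1),
          if_neg hd, if_neg (Nat.succ_ne_zero q)]
        obtain ⟨b, bs, hbs⟩ := List.exists_cons_of_ne_nil
          (fun h => hd ((chunksOf_eq_nil_iff _).mp h))
        rw [hbs]
        simp only [List.map_cons, PySem.Chars.join_cons_cons]
        rw [lineToList]
        simp

-- ===== VERDICT (by name: the statement is the Claim_ definition above) =====
theorem fmt_ids_spec : Claim_equal_fmt_ids := by
  intro ids _
  unfold Spec_fmt_ids
  apply String.toList_inj.mp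
  unfold fmt_ids fmt_ids_alt
  rw [foldA_toList, fmtLinesIdx_eq_chunksOf ids 0, List.drop_zero]
  rw [show PySem.List.enumerate ids 0 = PySem.List.enumerate ids ((10 * 0 : ℕ) : Int) by norm_num]
  rw [main_inv ids.length ids le_rfl 0,
    PySem.Str.toList_join, show ("\n" : String).toList = ['\n'] from rfl]
  by_cases hids : ids = []
  · subst hids
    rw [chunksOf_nil]
    simp
  · rw [if_neg hids, if_pos rfl]
    simp
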